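-- pv_equiv track=rewrite | github.com/okoks9011/problem_solving | codejam_kickstart/2018_round_f/ayla/ayla.py | common_anagram
-- ===== SOURCE A (Python) =====
-- from collections import Counter
--
-- def exist(counter, clen, b):
--     b_counter = Counter(b[:clen-1])
--     for k in range(clen-1, len(b)):
--         if b[k] not in b_counter:
--             b_counter[b[k]] = 0
--         b_counter[b[k]] += 1
--         if counter == b_counter:
--             return True
--         b_counter[b[k-clen+1]] -=1
--         if b_counter[b[k-clen+1]] == 0:
--             b_counter.pop(b[k-clen+1], None)
--     return False
--
-- def common_anagram(a, b):
--     result = 0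
--     for i in range(len(a)):
--         counter = Counter({})
--         for j in range(i, len(a)):
--             if a[j] not in counter:
--                 counter[a[j]] = 0
--             counter[a[j]] += 1
--             if exist(counter, j-i+1, b):
--                 result += 1
--     return result
-- ===== SOURCE B (Python) =====
-- def common_anagram(a, b):
--     n, m = len(a), len(b)
--     result = 0
--     for L in range(1, n + 1):
--         sigs = set()
--         for k in range(m - L + 1):
--             sigs.add(''.join(sorted(b[k:k + L])))
--         for i in range(n - L + 1):
--             if ''.join(sorted(a[i:i + L])) in sigs:
--                 result += 1
--     return result
-- ===== Notes on version B (the rewrite author's own statement) =====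
-- stated objective: faster
-- what changed: Instead of rescanning b with a rolling Counter for every substring of a, B iterates over substring lengths L, builds once per length the hash set of sorted signatures of all length-L windows of b, and counts the substrings of a whose sorted signature is in that set.
import Mathlib
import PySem

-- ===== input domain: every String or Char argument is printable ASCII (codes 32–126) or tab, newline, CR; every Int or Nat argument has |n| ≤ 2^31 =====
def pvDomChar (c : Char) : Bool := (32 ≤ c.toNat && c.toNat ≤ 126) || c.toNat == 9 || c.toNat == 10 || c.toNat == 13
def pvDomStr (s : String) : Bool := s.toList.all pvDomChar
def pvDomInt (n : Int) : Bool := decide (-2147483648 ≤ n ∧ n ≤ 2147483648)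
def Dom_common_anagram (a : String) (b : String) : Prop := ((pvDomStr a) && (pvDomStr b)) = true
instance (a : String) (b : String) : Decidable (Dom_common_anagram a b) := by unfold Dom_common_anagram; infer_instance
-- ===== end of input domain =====

-- B precomputes, per substring length, the set of sorted signatures of b's windows once,
-- replacing A's per-substring rolling-Counter scan of b; measurably faster (constant-factor).

-- ===== PORT A =====
-- Counter '==' (Python >= 3.10): counts agree on every key of either side, missing = 0.
def pyCounterEq (d1 d2 : PySem.Dict Char Int) : Bool :=
  (d1.keys ++ d2.keys).all (fun c => d1.getD c 0 == d2.getD c 0)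

-- the loop body of A's helper 'exist' (early return becomes a Bool flag threaded through the fold)
def existStep (counter : PySem.Dict Char Int) (clen : Int) (bs : List Char)
    (st : Bool × PySem.Dict Char Int) (k : Int) : Bool × PySem.Dict Char Int :=
  if st.1 then st
  else
    let bk := PySem.List.pyGetD bs k ' '                                        -- b[k] (k always in range)
    let d := if st.2.contains bk then st.2 else st.2.insert bk 0
    let d := d.modify bk 0 (· + 1)
    if pyCounterEq counter d then (true, d)
    else
      let c0 := PySem.List.pyGetD bs (k - clen + 1) ' '                         -- b[k-clen+1] (in range)
      let d := d.modify c0 0 (· - 1)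
      let d := if d.getD c0 0 == 0 then d.erase c0 else d                       -- pop(.., None): key present
      (false, d)

-- helper 'exist' of A: b_counter starts as Counter(b[:clen-1])
def existPy (counter : PySem.Dict Char Int) (clen : Int) (bs : List Char) : Bool :=
  ((PySem.List.pyRange (clen - 1) (bs.length : Int) 1).foldl (existStep counter clen bs)
    (false, PySem.Dict.counter (PySem.List.slice bs none (some (clen - 1))))).1

-- the body of A's inner j-loop (counter rolls across a[i..j], result counts hits)
def innerStep (as bs : List Char) (i : Int) (st : Int × PySem.Dict Char Int) (j : Int) :
    Int × PySem.Dict Char Int :=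
  let aj := PySem.List.pyGetD as j ' '                                          -- a[j] (in range)
  let counter := if st.2.contains aj then st.2 else st.2.insert aj 0
  let counter := counter.modify aj 0 (· + 1)
  if existPy counter (j - i + 1) bs then (st.1 + 1, counter) else (st.1, counter)

def common_anagram (a : String) (b : String) : Int :=
  (PySem.List.pyRange 0 (a.toList.length : Int) 1).foldl
    (fun result i =>
      ((PySem.List.pyRange i (a.toList.length : Int) 1).foldl
        (innerStep a.toList b.toList i) (result, PySem.Dict.empty)).1)
    0

-- ===== PORT B =====
-- signatures are the sorted character lists (''.join only changes the wrapper, List Char here)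
def common_anagram_alt (a : String) (b : String) : Int :=
  let as := a.toList
  let bs := b.toList
  let n : Int := as.length
  let m : Int := bs.length
  (PySem.List.pyRange 1 (n + 1) 1).foldl
    (fun result L =>
      let sigs := (PySem.List.pyRange 0 (m - L + 1) 1).foldl
        (fun s k =>
          PySem.Set.add s (PySem.List.sorted (PySem.List.slice bs (some k) (some (k + L))) (fun x => x) false))
        PySem.Set.empty
      (PySem.List.pyRange 0 (n - L + 1) 1).foldl
        (fun result i =>
          if PySem.Set.contains sigs (PySem.List.sorted (PySem.List.slice as (some i) (some (i + L))) (fun x => x) false)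
          then result + 1 else result)
        result)
    0

-- ===== PRECONDITION & SPEC =====
def Spec_common_anagram (a : String) (b : String) (out : Int) : Prop := out = common_anagram_alt a b
instance (a : String) (b : String) (out : Int) : Decidable (Spec_common_anagram a b out) := by unfold Spec_common_anagram; infer_instance

-- ===== CLAIM (what is proved, stated in full; the proofs are below) =====
def Claim_equal_common_anagram : Prop := ∀ (a : String) (b : String), Dom_common_anagram a b → Spec_common_anagram a b (common_anagram a b)

-- ===== LEMMAS AND PROOFS =====

-- 'good bs s': some window of bs of length s.length is an anagram of s (computable)
def good (bs s : List Char) : Bool :=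
  (List.range (bs.length + 1)).any
    (fun st => decide (st + s.length ≤ bs.length) && decide (s.Perm ((bs.drop st).take s.length)))

lemma good_iff (bs s : List Char) :
    good bs s = true ↔ ∃ st : Nat, st + s.length ≤ bs.length ∧ s.Perm ((bs.drop st).take s.length) := by
  unfold good
  simp only [List.any_eq_true, List.mem_range, Bool.and_eq_true, decide_eq_true_eq]
  constructor
  · rintro ⟨st, _, h1, h2⟩; exact ⟨st, h1, h2⟩
  · rintro ⟨st, h1, h2⟩; exact ⟨st, by omega, h1, h2⟩

-- 'd is the multiset of w': every count lookup agrees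
def CntOf (d : PySem.Dict Char Int) (w : List Char) : Prop :=
  ∀ c : Char, d.getD c 0 = (w.count c : Int)

lemma find?_filter_ne (t : List (Char × Int)) (k k' : Char) :
    ((t.filter (fun p => !(p.1 == k))).find? (fun p => p.1 == k'))
      = if k' = k then none else t.find? (fun p => p.1 == k') := by
  induction t with
  | nil => simp
  | cons p t ih =>
      by_cases h1 : p.1 = k
      · rw [List.filter_cons_of_neg (by simp [h1]), ih]
        by_cases h2 : k' = k
        · simp [h2]
        · rw [if_neg h2, if_neg h2,
            List.find?_cons_of_neg (by simp [h1]; exact fun hh => h2 hh.symm)]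
      · rw [List.filter_cons_of_pos (by simp [h1])]
        by_cases h2 : p.1 = k'
        · have hkk : ¬k' = k := fun hh => h1 (by rw [h2, hh])
          rw [List.find?_cons_of_pos (by simp [h2]), if_neg hkk,
            List.find?_cons_of_pos (by simp [h2])]
        · rw [List.find?_cons_of_neg (by simp [h2]), List.find?_cons_of_neg (by simp [h2]), ih]

lemma get?_erase (d : PySem.Dict Char Int) (k k' : Char) :
    (d.erase k).get? k' = if k' = k then none else d.get? k' := by
  simp only [PySem.Dict.erase, PySem.Dict.get?, find?_filter_ne]
  split <;> rfl

lemma getD_erase (d : PySem.Dict Char Int) (k k' : Char) (v0 : Int) :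
    (d.erase k).getD k' v0 = if k' = k then v0 else d.getD k' v0 := by
  simp only [PySem.Dict.getD, get?_erase]
  split <;> simp

lemma cntOf_counter (xs : List Char) : CntOf (PySem.Dict.counter xs) xs := by
  intro c; simp [PySem.Dict.getD_counter]

lemma cntOf_stepAdd {d : PySem.Dict Char Int} {w : List Char} (h : CntOf d w) (c : Char) :
    CntOf ((if d.contains c then d else d.insert c 0).modify c 0 (· + 1)) (w ++ [c]) := by
  have base : ∀ c' : Char, (if d.contains c then d else d.insert c 0).getD c' 0 = d.getD c' 0 := by
    intro c'
    split
    · rfl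
    · rename_i hnc
      rw [PySem.Dict.getD_insert]
      split
      · rename_i he; subst he
        rw [PySem.Dict.getD_of_not_contains d 0 (by simpa using hnc)]
      · rfl
  intro c'
  rw [PySem.Dict.getD_modify]
  split
  · rename_i he
    rw [base, h, he]
    simp [List.count_append]
  · rename_i hne
    rw [base, h]
    have : List.count c' [c] = 0 := by
      simp [List.count_singleton]
      exact Ne.symm hne
    simp [List.count_append, this]

lemma cntOf_stepDel {d : PySem.Dict Char Int} {c : Char} {w : List Char} (h : CntOf d (c :: w)) :
    CntOf (if (d.modify c 0 (· - 1)).getD c 0 == 0 then (d.modify c 0 (· - 1)).erase c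
           else d.modify c 0 (· - 1)) w := by
  have h1 : ∀ c' : Char, (d.modify c 0 (· - 1)).getD c' 0 = (w.count c' : Int) := by
    intro c'
    rw [PySem.Dict.getD_modify]
    split
    · rename_i he
      rw [h c, he]
      simp [List.count_cons_self]
    · rename_i hne
      rw [h c']
      simp [List.count_cons]
      exact fun hh => hne hh.symm
  split
  · rename_i hz
    intro c'
    rw [getD_erase]
    split
    · rename_i he
      have h2 := h1 c
      rw [he]
      simp only [beq_iff_eq, h1 c] at hz
      omega
    · exact h1 c'
  · exact h1

lemma pyCounterEq_iff {d1 d2 : PySem.Dict Char Int} {s w : List Char}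
    (h1 : CntOf d1 s) (h2 : CntOf d2 w) : (pyCounterEq d1 d2 = true ↔ s.Perm w) := by
  unfold pyCounterEq
  rw [List.all_eq_true]
  constructor
  · intro hall
    rw [List.perm_iff_count]
    intro c
    by_cases hc : c ∈ d1.keys ++ d2.keys
    · have := hall c hc
      rw [h1 c, h2 c] at this
      simpa using this
    · simp only [List.mem_append, not_or] at hc
      have e1 : d1.getD c 0 = 0 := by
        apply PySem.Dict.getD_of_not_contains
        rcases Bool.eq_false_or_eq_true (d1.contains c) with h | h
        · exact absurd ((PySem.Dict.contains_iff_mem_keys d1 c).1 h) hc.1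
        · exact h
      have e2 : d2.getD c 0 = 0 := by
        apply PySem.Dict.getD_of_not_contains
        rcases Bool.eq_false_or_eq_true (d2.contains c) with h | h
        · exact absurd ((PySem.Dict.contains_iff_mem_keys d2 c).1 h) hc.2
        · exact h
      have e1' := h1 c; have e2' := h2 c
      rw [e1] at e1'; rw [e2] at e2'
      omega
  · intro hperm c _
    rw [h1 c, h2 c, List.Perm.count_eq hperm]
    simp

-- window identities
lemma window_snoc (bs : List Char) (L k : Nat) (hL : 1 ≤ L) (hk : L - 1 ≤ k) (hkm : k < bs.length) :
    (bs.drop (k + 1 - L)).take L = (bs.drop (k + 1 - L)).take (L - 1) ++ [bs.getD k ' '] := by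
  obtain ⟨l1, rfl⟩ : ∃ l1, L = l1 + 1 := ⟨L - 1, by omega⟩
  have h1 : (bs.drop (k + 1 - (l1 + 1)))[l1]? = some (bs.getD k ' ') := by
    rw [List.getElem?_drop]
    have he : k + 1 - (l1 + 1) + l1 = k := by omega
    rw [he, List.getElem?_eq_getElem hkm, List.getD_eq_getElem?_getD,
      List.getElem?_eq_getElem hkm]
    rfl
  rw [List.take_add_one, h1]
  simp

lemma window_cons (bs : List Char) (L k : Nat) (hL : 1 ≤ L) (hk : L - 1 ≤ k) (hkm : k < bs.length) :
    (bs.drop (k + 1 - L)).take L = bs.getD (k + 1 - L) ' ' :: (bs.drop (k + 2 - L)).take (L - 1) := by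
  obtain ⟨l1, rfl⟩ : ∃ l1, L = l1 + 1 := ⟨L - 1, by omega⟩
  have hs : k + 1 - (l1 + 1) < bs.length := by omega
  rw [List.drop_eq_getElem_cons hs, List.take_succ_cons,
    show k + 1 - (l1 + 1) + 1 = k + 2 - (l1 + 1) from by omega, List.getD_eq_getElem?_getD,
    List.getElem?_eq_getElem hs]
  simp

lemma foldl_existStep_true (counter : PySem.Dict Char Int) (clen : Int) (bs : List Char)
    (l : List Int) (st : Bool × PySem.Dict Char Int) (h : st.1 = true) :
    l.foldl (existStep counter clen bs) st = st := by
  induction l with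
  | nil => rfl
  | cons x xs ih =>
      have : existStep counter clen bs st x = st := by simp [existStep, h]
      rw [List.foldl_cons, this, ih]

lemma existLoop (counter : PySem.Dict Char Int) (s bs : List Char) (L : Nat) (hL : 1 ≤ L)
    (hs : CntOf counter s) :
    ∀ (fuel k : Nat), k + fuel = bs.length → L - 1 ≤ k →
      ∀ d, CntOf d ((bs.drop (k + 1 - L)).take (L - 1)) →
      (((PySem.List.pyRange (k : Int) (bs.length : Int) 1).foldl
          (existStep counter (L : Int) bs) (false, d)).1 = true
        ↔ ∃ t : Nat, k ≤ t ∧ t < bs.length ∧ s.Perm ((bs.drop (t + 1 - L)).take L)) := by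
  intro fuel
  induction fuel with
  | zero =>
      intro k hsum hkL d hd
      rw [PySem.List.pyRange_one_eq_nil (by exact_mod_cast Int.ofNat_le.2 (by omega))]
      simp only [List.foldl_nil]
      constructor
      · intro hfalse; simp at hfalse
      · rintro ⟨t, h1, h2, -⟩; omega
  | succ fuel ih =>
      intro k hsum hkL d hd
      have hkm : k < bs.length := by omega
      rw [PySem.List.pyRange_one_cons (by exact_mod_cast hkm), List.foldl_cons]
      have hbk : PySem.List.pyGetD bs (k : Int) ' ' = bs.getD k ' ' := PySem.List.pyGetD_natCast bs k ' '
      have hg0 : PySem.List.pyGetD bs ((k : Int) - (L : Int) + 1) ' ' = bs.getD (k + 1 - L) ' ' := by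
        rw [show (k : Int) - (L : Int) + 1 = ((k + 1 - L : Nat) : Int) from by
            rw [Nat.cast_sub (by omega), Nat.cast_add]; push_cast; ring,
          PySem.List.pyGetD_natCast]
      have hd1 : CntOf ((if d.contains (bs.getD k ' ') then d else d.insert (bs.getD k ' ') 0).modify
          (bs.getD k ' ') 0 (· + 1)) ((bs.drop (k + 1 - L)).take L) := by
        rw [window_snoc bs L k hL hkL hkm]
        exact cntOf_stepAdd hd (bs.getD k ' ')
      set d1 := (if d.contains (bs.getD k ' ') then d else d.insert (bs.getD k ' ') 0).modify
          (bs.getD k ' ') 0 (· + 1) with hd1def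
      have hstep : existStep counter (L : Int) bs (false, d) (k : Int)
          = (if pyCounterEq counter d1 then (true, d1)
             else (false,
               if (d1.modify (bs.getD (k + 1 - L) ' ') 0 (· - 1)).getD (bs.getD (k + 1 - L) ' ') 0 == 0
               then (d1.modify (bs.getD (k + 1 - L) ' ') 0 (· - 1)).erase (bs.getD (k + 1 - L) ' ')
               else d1.modify (bs.getD (k + 1 - L) ' ') 0 (· - 1))) := by
        simp only [existStep, hbk, hg0, Bool.false_eq_true, if_false, hd1def]
      by_cases hcmp : pyCounterEq counter d1 = true
      · rw [hstep, if_pos hcmp, foldl_existStep_true _ _ _ _ _ rfl]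
        have hperm : s.Perm ((bs.drop (k + 1 - L)).take L) := (pyCounterEq_iff hs hd1).1 hcmp
        exact iff_of_true rfl ⟨k, le_refl _, hkm, hperm⟩
      · rw [hstep, if_neg hcmp]
        have hwc := window_cons bs L k hL hkL hkm
        have hd1' : CntOf d1 (bs.getD (k + 1 - L) ' ' :: (bs.drop (k + 2 - L)).take (L - 1)) := by
          rw [← hwc]; exact hd1
        have hd2 := cntOf_stepDel hd1'
        have hd2' : CntOf
            (if (d1.modify (bs.getD (k + 1 - L) ' ') 0 (· - 1)).getD (bs.getD (k + 1 - L) ' ') 0 == 0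
             then (d1.modify (bs.getD (k + 1 - L) ' ') 0 (· - 1)).erase (bs.getD (k + 1 - L) ' ')
             else d1.modify (bs.getD (k + 1 - L) ' ') 0 (· - 1))
            ((bs.drop (k + 1 + 1 - L)).take (L - 1)) := by
          rw [show k + 1 + 1 - L = k + 2 - L from by omega]
          exact hd2
        rw [show ((k : Int) + 1) = ((k + 1 : Nat) : Int) by push_cast; ring]
        rw [ih (k + 1) (by omega) (by omega) _ hd2']
        constructor
        · rintro ⟨t, h1, h2, h3⟩; exact ⟨t, by omega, h2, h3⟩
        · rintro ⟨t, h1, h2, h3⟩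
          rcases Nat.eq_or_lt_of_le h1 with he | hlt
          · exfalso
            apply hcmp
            apply (pyCounterEq_iff hs hd1).2
            rw [he]; exact h3
          · exact ⟨t, by omega, h2, h3⟩

lemma existPy_eq_good (counter : PySem.Dict Char Int) (s bs : List Char)
    (hs : CntOf counter s) (hlen : 1 ≤ s.length) :
    existPy counter (s.length : Int) bs = good bs s := by
  set L := s.length with hLdef
  rw [Bool.eq_iff_iff, good_iff]
  unfold existPy
  by_cases hLm : L - 1 ≤ bs.length
  · have hinit : CntOf (PySem.Dict.counter (PySem.List.slice bs none (some ((L - 1 : Nat) : Int))))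
        ((bs.drop ((L - 1) + 1 - L)).take (L - 1)) := by
      rw [PySem.List.slice_to_natCast,
        show (L - 1) + 1 - L = 0 from by omega, List.drop_zero]
      exact cntOf_counter _
    have h := existLoop counter s bs L hlen hs (bs.length - (L - 1)) (L - 1) (by omega)
      (le_refl _) _ hinit
    rw [show ((L : Int) - 1) = (((L - 1 : Nat)) : Int) from (Nat.cast_sub hlen).symm]
    rw [h]
    constructor
    · rintro ⟨t, h1, h2, h3⟩
      exact ⟨t + 1 - L, by omega, h3⟩
    · rintro ⟨st, h1, h2⟩
      refine ⟨st + L - 1, by omega, by omega, ?_⟩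
      rw [show st + L - 1 + 1 - L = st from by omega]
      exact h2
  · rw [PySem.List.pyRange_one_eq_nil (by
      rw [show (L : Int) - 1 = ((L - 1 : Nat) : Int) from (Nat.cast_sub hlen).symm]
      exact_mod_cast Int.ofNat_le.2 (by omega))]
    simp only [List.foldl_nil]
    constructor
    · intro hh; simp at hh
    · rintro ⟨st, h1, -⟩; omega

-- inner j-loop of A accumulates the per-substring checks
lemma innerLoop (as bs : List Char) (i : Nat) :
    ∀ (fuel j : Nat), j + fuel = as.length → i ≤ j →
      ∀ (res : Int) (d : PySem.Dict Char Int), CntOf d ((as.drop i).take (j - i)) →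
      (((PySem.List.pyRange (j : Int) (as.length : Int) 1).foldl
          (innerStep as bs (i : Int)) (res, d)).1)
      = res + ((List.range fuel).countP (fun t => good bs ((as.drop i).take (j - i + t + 1))) : Int) := by
  intro fuel
  induction fuel with
  | zero =>
      intro j hsum hij res d hd
      rw [PySem.List.pyRange_one_eq_nil (by exact_mod_cast Int.ofNat_le.2 (by omega))]
      simp
  | succ fuel ih =>
      intro j hsum hij res d hd
      have hjm : j < as.length := by omega
      rw [PySem.List.pyRange_one_cons (by exact_mod_cast hjm), List.foldl_cons]
      have hcnt : CntOf ((if d.contains (as.getD j ' ') then d else d.insert (as.getD j ' ') 0).modify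
          (as.getD j ' ') 0 (· + 1)) ((as.drop i).take (j - i + 1)) := by
        have hw := window_snoc as (j - i + 1) j (by omega) (by omega) hjm
        rw [show j + 1 - (j - i + 1) = i from by omega,
          show j - i + 1 - 1 = j - i from by omega] at hw
        rw [hw]
        exact cntOf_stepAdd hd _
      have hslen : ((as.drop i).take (j - i + 1)).length = j - i + 1 := by
        simp [List.length_take, List.length_drop]
        omega
      have hgood : existPy ((if d.contains (as.getD j ' ') then d else d.insert (as.getD j ' ') 0).modify
            (as.getD j ' ') 0 (· + 1)) ((j : Int) - (i : Int) + 1) bs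
          = good bs ((as.drop i).take (j - i + 1)) := by
        have hh := existPy_eq_good _ ((as.drop i).take (j - i + 1)) bs hcnt (by rw [hslen]; omega)
        rw [hslen] at hh
        rw [show (j : Int) - (i : Int) + 1 = ((j - i + 1 : Nat) : Int) from by
          rw [Nat.cast_add, Nat.cast_sub hij]; push_cast; ring]
        exact hh
      have hstep : innerStep as bs (i : Int) (res, d) (j : Int)
          = (if good bs ((as.drop i).take (j - i + 1))
             then (res + 1, (if d.contains (as.getD j ' ') then d else d.insert (as.getD j ' ') 0).modify
                    (as.getD j ' ') 0 (· + 1))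
             else (res, (if d.contains (as.getD j ' ') then d else d.insert (as.getD j ' ') 0).modify
                    (as.getD j ' ') 0 (· + 1))) := by
        simp only [innerStep, PySem.List.pyGetD_natCast]
        rw [hgood]
      rw [hstep]
      have harith : ((j : Int) + 1) = ((j + 1 : Nat) : Int) := by push_cast; ring
      have hd' : CntOf ((if d.contains (as.getD j ' ') then d else d.insert (as.getD j ' ') 0).modify
          (as.getD j ' ') 0 (· + 1)) ((as.drop i).take (j + 1 - i)) := by
        rw [show j + 1 - i = j - i + 1 from by omega]
        exact hcnt
      have hcmap : ∀ (r : Int),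
          r + ((List.range fuel).countP (fun t => good bs ((as.drop i).take (j + 1 - i + t + 1))) : Int)
          = r + ((List.range fuel).countP (fun t => good bs ((as.drop i).take (j - i + (t + 1) + 1))) : Int) := by
        intro r
        congr 2
        apply List.countP_congr
        intro t _
        rw [show j + 1 - i + t + 1 = j - i + (t + 1) + 1 from by omega]
      have hsplit : ((List.range (fuel + 1)).countP (fun t => good bs ((as.drop i).take (j - i + t + 1))) : Nat)
          = (if good bs ((as.drop i).take (j - i + 0 + 1)) then 1 else 0)
            + (List.range fuel).countP (fun t => good bs ((as.drop i).take (j - i + (t + 1) + 1))) := by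
        rw [List.range_succ_eq_map, List.countP_cons, List.countP_map]
        simp only [Function.comp_def, Nat.succ_eq_add_one]
        omega
      by_cases hg : good bs ((as.drop i).take (j - i + 1)) = true
      · rw [if_pos hg, harith, ih (j + 1) (by omega) (by omega) (res + 1) _ hd', hcmap, hsplit]
        rw [show j - i + 0 + 1 = j - i + 1 from by omega, if_pos hg]
        push_cast
        ring
      · rw [if_neg hg, harith, ih (j + 1) (by omega) (by omega) res _ hd', hcmap, hsplit]
        rw [show j - i + 0 + 1 = j - i + 1 from by omega, if_neg hg]
        push_cast
        ring

lemma a_eq_sum (a b : String) :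
    common_anagram a b =
      ((List.range a.toList.length).map
        (fun i => (((List.range (a.toList.length - i)).countP
          (fun t => good b.toList ((a.toList.drop i).take (t + 1)))) : Int))).sum := by
  have h : ∀ (acc : Int) (k : Nat), k ∈ List.range a.toList.length →
      ((PySem.List.pyRange (k : Int) (a.toList.length : Int) 1).foldl
        (innerStep a.toList b.toList (k : Int)) (acc, PySem.Dict.empty)).1
      = acc + ((List.range (a.toList.length - k)).countP
          (fun t => good b.toList ((a.toList.drop k).take (t + 1))) : Int) := by
    intro acc k hk
    have hk' := List.mem_range.1 hk
    have hd0 : CntOf PySem.Dict.empty ((a.toList.drop k).take (k - k)) := by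
      rw [Nat.sub_self]
      intro c
      simp [PySem.Dict.getD_empty]
    have hh := innerLoop a.toList b.toList k (a.toList.length - k) k (by omega) (le_refl k)
      acc PySem.Dict.empty hd0
    simpa [show ∀ t, k - k + t + 1 = t + 1 from fun t => by omega] using hh
  calc common_anagram a b
      = (List.range a.toList.length).foldl
          (fun (acc : Int) (k : Nat) =>
            ((PySem.List.pyRange (k : Int) (a.toList.length : Int) 1).foldl
              (innerStep a.toList b.toList (k : Int)) (acc, PySem.Dict.empty)).1) 0 := by
        unfold common_anagram
        rw [PySem.List.pyRange_one]
        simp only [Int.sub_zero, Int.toNat_natCast, zero_add]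
        rw [List.foldl_map]
    _ = (List.range a.toList.length).foldl
          (fun (acc : Int) (k : Nat) => acc + ((List.range (a.toList.length - k)).countP
            (fun t => good b.toList ((a.toList.drop k).take (t + 1))) : Int)) 0 :=
        PySem.List.foldl_congr_mem _ _ _ _ h
    _ = ((List.range a.toList.length).map
          (fun i => (((List.range (a.toList.length - i)).countP
            (fun t => good b.toList ((a.toList.drop i).take (t + 1)))) : Int))).sum := by
        rw [PySem.List.foldl_add]
        simp

lemma b_eq_sum (a b : String) :
    common_anagram_alt a b =
      ((List.range a.toList.length).map
        (fun k => (((List.range (a.toList.length - k)).countP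
          (fun i => good b.toList ((a.toList.drop i).take (k + 1)))) : Int))).sum := by
  have h : ∀ (acc : Int) (k : Nat), k ∈ List.range a.toList.length →
      ((PySem.List.pyRange 0 ((a.toList.length : Int) - (1 + (k : Int)) + 1) 1).foldl
        (fun result i =>
          if PySem.Set.contains
              ((PySem.List.pyRange 0 ((b.toList.length : Int) - (1 + (k : Int)) + 1) 1).foldl
                (fun s k' => PySem.Set.add s
                  (PySem.List.sorted (PySem.List.slice b.toList (some k') (some (k' + (1 + (k : Int))))) (fun x => x) false))
                PySem.Set.empty)
              (PySem.List.sorted (PySem.List.slice a.toList (some i) (some (i + (1 + (k : Int))))) (fun x => x) false)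
          then result + 1 else result)
        acc)
      = acc + ((List.range (a.toList.length - k)).countP
          (fun i => good b.toList ((a.toList.drop i).take (k + 1))) : Int) := by
    intro acc k hk
    have hkn := List.mem_range.1 hk
    -- name the set of window signatures
    set f : Int → List Char := fun k' =>
      PySem.List.sorted (PySem.List.slice b.toList (some k') (some (k' + (1 + (k : Int))))) (fun x => x) false with hf
    set ks := PySem.List.pyRange 0 ((b.toList.length : Int) - (1 + (k : Int)) + 1) 1 with hks
    have hsig : ks.foldl (fun s k' => PySem.Set.add s (f k')) PySem.Set.empty
        = PySem.Set.ofList (ks.map f) := by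
      rw [PySem.Set.ofList_eq_foldl, List.foldl_map]
      rfl
    rw [hsig]
    -- pointwise: the membership test is exactly 'good'
    have hmem : ∀ i : Nat, i ∈ List.range (a.toList.length - k) →
        PySem.Set.contains (PySem.Set.ofList (ks.map f))
          (PySem.List.sorted (PySem.List.slice a.toList (some (i : Int)) (some ((i : Int) + (1 + (k : Int))))) (fun x => x) false)
        = good b.toList ((a.toList.drop i).take (k + 1)) := by
      intro i hi
      have hin := List.mem_range.1 hi
      have hsl : PySem.List.slice a.toList (some (i : Int)) (some ((i : Int) + (1 + (k : Int))))
          = (a.toList.drop i).take (k + 1) := by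
        rw [show ((i : Int) + (1 + (k : Int))) = ((i : Int) + ((k + 1 : Nat) : Int)) from by push_cast; ring,
          PySem.List.slice_natCast_add]
      rw [hsl]
      have hlen : ((a.toList.drop i).take (k + 1)).length = k + 1 := by
        rw [List.length_take, List.length_drop]
        omega
      rw [Bool.eq_iff_iff, PySem.Set.contains_iff, PySem.Set.mem_ofList, good_iff, hlen]
      constructor
      · intro hx
        obtain ⟨kI, hkI, hfk⟩ := List.mem_map.1 hx
        rw [hks, PySem.List.mem_pyRange_one] at hkI
        obtain ⟨st, rfl⟩ : ∃ st : Nat, kI = (st : Int) := ⟨kI.toNat, by omega⟩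
        refine ⟨st, by omega, ?_⟩
        rw [hf] at hfk
        simp only at hfk
        rw [show ((st : Int) + (1 + (k : Int))) = ((st : Int) + ((k + 1 : Nat) : Int)) from by push_cast; ring,
          PySem.List.slice_natCast_add] at hfk
        exact ((PySem.List.sorted_id_eq_sorted_id_iff_perm _ _).1 hfk).symm
      · rintro ⟨st, hst, hperm⟩
        refine List.mem_map.2 ⟨(st : Int), ?_, ?_⟩
        · rw [hks, PySem.List.mem_pyRange_one]
          omega
        · rw [hf]
          simp only
          rw [show ((st : Int) + (1 + (k : Int))) = ((st : Int) + ((k + 1 : Nat) : Int)) from by push_cast; ring,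
            PySem.List.slice_natCast_add]
          exact (PySem.List.sorted_id_eq_sorted_id_iff_perm _ _).2 hperm.symm
    rw [PySem.List.foldl_if_add_one]
    congr 1
    rw [show ((a.toList.length : Int) - (1 + (k : Int)) + 1) = ((a.toList.length - k : Nat) : Int) from by
      rw [Nat.cast_sub (le_of_lt hkn)]; ring]
    rw [PySem.List.pyRange_one]
    simp only [Int.sub_zero, Int.toNat_natCast, zero_add]
    rw [List.countP_map]
    congr 1
    apply List.countP_congr
    intro i hi
    simp only [Function.comp_def]
    rw [hmem i hi]
  calc common_anagram_alt a b
      = (List.range a.toList.length).foldl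
          (fun (acc : Int) (k : Nat) =>
            ((PySem.List.pyRange 0 ((a.toList.length : Int) - (1 + (k : Int)) + 1) 1).foldl
              (fun result i =>
                if PySem.Set.contains
                    ((PySem.List.pyRange 0 ((b.toList.length : Int) - (1 + (k : Int)) + 1) 1).foldl
                      (fun s k' => PySem.Set.add s
                        (PySem.List.sorted (PySem.List.slice b.toList (some k') (some (k' + (1 + (k : Int))))) (fun x => x) false))
                      PySem.Set.empty)
                    (PySem.List.sorted (PySem.List.slice a.toList (some i) (some (i + (1 + (k : Int))))) (fun x => x) false)
                then result + 1 else result)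
              acc)) 0 := by
        simp only [common_anagram_alt]
        rw [PySem.List.pyRange_one]
        simp only [add_sub_cancel_right, Int.toNat_natCast]
        rw [List.foldl_map]
    _ = (List.range a.toList.length).foldl
          (fun (acc : Int) (k : Nat) => acc + ((List.range (a.toList.length - k)).countP
            (fun i => good b.toList ((a.toList.drop i).take (k + 1))) : Int)) 0 :=
        PySem.List.foldl_congr_mem _ _ _ _ h
    _ = ((List.range a.toList.length).map
          (fun k => (((List.range (a.toList.length - k)).countP
            (fun i => good b.toList ((a.toList.drop i).take (k + 1)))) : Int))).sum := by
        rw [PySem.List.foldl_add]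
        simp

lemma list_sum_eq (f : Nat → Int) (n : Nat) :
    ((List.range n).map f).sum = ∑ x ∈ Finset.range n, f x := rfl

lemma countP_range_sum (p : Nat → Bool) (m : Nat) :
    ((List.range m).countP p : Int) = ∑ t ∈ Finset.range m, (if p t then (1 : Int) else 0) := by
  induction m with
  | zero => simp
  | succ m ih =>
      rw [List.range_succ, List.countP_append, Finset.sum_range_succ, ← ih]
      push_cast [List.countP_cons, List.countP_nil]
      split_ifs <;> ring

lemma sum_range_extend (g : Nat → Int) (m n : Nat) (h : m ≤ n) :
    ∑ t ∈ Finset.range m, g t = ∑ t ∈ Finset.range n, if t < m then g t else 0 := by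
  rw [← Finset.sum_filter]
  congr 1
  ext t
  simp only [Finset.mem_filter, Finset.mem_range]
  omega

lemma swap_sum (P : Nat → Nat → Bool) (n : Nat) :
    ((List.range n).map (fun i => (((List.range (n - i)).countP (fun t => P i t)) : Int))).sum
  = ((List.range n).map (fun t => (((List.range (n - t)).countP (fun i => P i t)) : Int))).sum := by
  rw [list_sum_eq, list_sum_eq]
  calc ∑ i ∈ Finset.range n, (((List.range (n - i)).countP (fun t => P i t)) : Int)
      = ∑ i ∈ Finset.range n, ∑ t ∈ Finset.range (n - i), (if P i t then (1 : Int) else 0) :=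
        Finset.sum_congr rfl (fun i _ => countP_range_sum _ _)
    _ = ∑ i ∈ Finset.range n, ∑ t ∈ Finset.range n, (if t < n - i then (if P i t then (1 : Int) else 0) else 0) :=
        Finset.sum_congr rfl (fun i _ => sum_range_extend _ _ _ (Nat.sub_le _ _))
    _ = ∑ t ∈ Finset.range n, ∑ i ∈ Finset.range n, (if t < n - i then (if P i t then (1 : Int) else 0) else 0) :=
        Finset.sum_comm
    _ = ∑ t ∈ Finset.range n, ∑ i ∈ Finset.range n, (if i < n - t then (if P i t then (1 : Int) else 0) else 0) := by
        apply Finset.sum_congr rfl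
        intro t ht
        apply Finset.sum_congr rfl
        intro i hi
        have ht' := Finset.mem_range.1 ht
        have hi' := Finset.mem_range.1 hi
        have hflip : (t < n - i) = (i < n - t) := by
          apply propext
          constructor <;> (intro; omega)
        simp only [hflip]
    _ = ∑ t ∈ Finset.range n, ∑ i ∈ Finset.range (n - t), (if P i t then (1 : Int) else 0) :=
        Finset.sum_congr rfl (fun t _ => (sum_range_extend _ _ _ (Nat.sub_le _ _)).symm)
    _ = ∑ t ∈ Finset.range n, (((List.range (n - t)).countP (fun i => P i t)) : Int) :=
        Finset.sum_congr rfl (fun t _ => (countP_range_sum _ _).symm)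

-- ===== VERDICT (by name: the statement is the Claim_ definition above) =====
theorem common_anagram_spec : Claim_equal_common_anagram := by
  intro a b _
  unfold Spec_common_anagram
  rw [a_eq_sum, b_eq_sum, swap_sum (fun i t => good b.toList ((a.toList.drop i).take (t + 1)))]
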